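-- pv_equiv track=rewrite | github.com/Sierraki/Solutions | Leetcode/算法&Algorithm/题库/1989.捉迷藏中可捕获的最大人数.py | catchMaximumAmountofPeople
-- ===== SOURCE A (Python) =====
-- from typing import List
--
-- def catchMaximumAmountofPeople(team: List[int], dist: int) -> int:
--     a = []
--     b = []
--     for i, j in enumerate(team):
--         if j == 1:
--             a.append(i)
--         else:
--             b.append(i)
--     top = down = 0
--     ans = 0
--     while top < len(a) and down < len(b):
--         if abs(b[down] - a[top]) <= dist:
--             ans += 1
--             top += 1
--             down += 1
--         else:
--             if b[down] > a[top]: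
--                 top += 1
--             else:
--                 down += 1
--     return ans
-- ===== SOURCE B (Python) =====
-- from typing import List
--
-- def catchMaximumAmountofPeople(team: List[int], dist: int) -> int:
--     # single left-to-right sweep with two FIFO queues of unmatched indices
--     qa = []  # unmatched catchers (value 1)
--     qb = []  # unmatched people (other values)
--     ans = 0
--     for i, j in enumerate(team):
--         own, opp = (qa, qb) if j == 1 else (qb, qa)
--         while opp and opp[0] < i - dist:
--             opp.pop(0)
--         if opp:
--             opp.pop(0)
--             ans += 1
--         else:
--             own.append(i)
--     return ans
-- ===== Notes on version B (the rewrite author's own statement) =====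
-- stated objective: alternative
-- what changed: Replaced A's partition-into-two-index-lists followed by a two-pointer walk with a single left-to-right sweep over the original team list that keeps two FIFO queues of still-unmatched indices, expiring queue fronts older than i - dist and matching the current index against the opposite queue's front.
import Mathlib
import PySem

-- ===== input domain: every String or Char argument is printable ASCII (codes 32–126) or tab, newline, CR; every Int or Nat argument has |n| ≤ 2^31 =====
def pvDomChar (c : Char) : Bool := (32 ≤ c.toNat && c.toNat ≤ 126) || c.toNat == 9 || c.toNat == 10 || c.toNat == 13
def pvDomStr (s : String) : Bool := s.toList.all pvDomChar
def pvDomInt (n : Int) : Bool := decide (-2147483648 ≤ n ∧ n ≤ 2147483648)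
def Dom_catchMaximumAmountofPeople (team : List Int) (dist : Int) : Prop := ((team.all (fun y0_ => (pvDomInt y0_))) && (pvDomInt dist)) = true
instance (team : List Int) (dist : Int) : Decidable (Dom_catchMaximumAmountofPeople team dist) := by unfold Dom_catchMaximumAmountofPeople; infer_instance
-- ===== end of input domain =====

-- B replaces A's partition-then-two-pointer with a single left-to-right sweep over team keeping
-- two FIFO queues of still-unmatched indices with front expiry (objective: alternative, same result).


-- ===== PORT A =====
-- 'for i, j in enumerate(team)': recursion over team carrying the index i and the two lists
def partA : List Int → Int → List Int × List Int → List Int × List Int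
  | [], _, acc => acc
  | j :: rest, i, (a, b) =>
    if j == 1 then partA rest (i + 1) (a ++ [i], b)
    else partA rest (i + 1) (a, b ++ [i])

-- the 'while top < len(a) and down < len(b)' loop, indices exactly as in the Python;
-- the Nat fuel only makes the recursion structural: each iteration moves top or down forward,
-- so len(a)+len(b) steps always suffice and the guard is never the reason the loop stops
def loopA (dist : Int) (a b : List Int) : Nat → Nat → Nat → Int → Int
  | 0, _, _, ans => ans
  | fuel + 1, top, down, ans =>
    if h : top < a.length ∧ down < b.length then
      if |b[down]'h.2 - a[top]'h.1| ≤ dist then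
        loopA dist a b fuel (top + 1) (down + 1) (ans + 1)
      else
        if b[down]'h.2 > a[top]'h.1 then loopA dist a b fuel (top + 1) down ans
        else loopA dist a b fuel top (down + 1) ans
    else ans

def catchMaximumAmountofPeople (team : List Int) (dist : Int) : Int :=
  let ab := partA team 0 ([], [])
  loopA dist ab.1 ab.2 (ab.1.length + ab.2.length) 0 0 0

-- ===== PORT B =====
-- one pass; state = (queue of unmatched catcher indices, queue of unmatched person indices, ans)
def bLoop (dist : Int) : List Int → Int → List Int × List Int × Int → Int
  | [], _, s => s.2.2
  | j :: rest, i, (qa, qb, ans) =>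
    if j == 1 then
      match qb.dropWhile (fun x => x < i - dist) with   -- 'while opp and opp[0] < i - dist: opp.pop(0)'
      | [] => bLoop dist rest (i + 1) (qa ++ [i], [], ans)
      | _ :: t => bLoop dist rest (i + 1) (qa, t, ans + 1)
    else
      match qa.dropWhile (fun x => x < i - dist) with
      | [] => bLoop dist rest (i + 1) ([], qb ++ [i], ans)
      | _ :: t => bLoop dist rest (i + 1) (t, qb, ans + 1)

def catchMaximumAmountofPeople_alt (team : List Int) (dist : Int) : Int :=
  bLoop dist team 0 ([], [], 0)

-- ===== PRECONDITION & SPEC =====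
def Spec_catchMaximumAmountofPeople (team : List Int) (dist : Int) (out : Int) : Prop := out = catchMaximumAmountofPeople_alt team dist
instance (team : List Int) (dist : Int) (out : Int) : Decidable (Spec_catchMaximumAmountofPeople team dist out) := by unfold Spec_catchMaximumAmountofPeople; infer_instance

-- ===== CLAIM (what is proved, stated in full; the proofs are below) =====
def Claim_equal_catchMaximumAmountofPeople : Prop := ∀ (team : List Int) (dist : Int), Dom_catchMaximumAmountofPeople team dist → Spec_catchMaximumAmountofPeople team dist (catchMaximumAmountofPeople team dist)

-- ===== LEMMAS AND PROOFS =====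

-- reference recursion: two-pointer matching on the remaining suffixes; returns (rest of a, rest of b, count)
def twoSt (dist : Int) : List Int → List Int → List Int × List Int × Int
  | [], b => ([], b, 0)
  | a :: as_, [] => (a :: as_, [], 0)
  | x :: xs, y :: ys =>
    if |y - x| ≤ dist then
      let r := twoSt dist xs ys
      (r.1, r.2.1, r.2.2 + 1)
    else if y > x then twoSt dist xs (y :: ys)
    else twoSt dist (x :: xs) ys
termination_by a b => a.length + b.length

-- index lists of catchers / people in 'rest' starting at index k
def aIdx : List Int → Int → List Int
  | [], _ => []
  | j :: r, k => if j == 1 then k :: aIdx r (k + 1) else aIdx r (k + 1)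

def bIdx : List Int → Int → List Int
  | [], _ => []
  | j :: r, k => if j == 1 then bIdx r (k + 1) else k :: bIdx r (k + 1)

theorem partA_eq (rest : List Int) : ∀ (k : Int) (accA accB : List Int),
    partA rest k (accA, accB) = (accA ++ aIdx rest k, accB ++ bIdx rest k) := by
  induction rest with
  | nil => intro k accA accB; simp [partA, aIdx, bIdx]
  | cons j r ih =>
    intro k accA accB
    by_cases hj : j == 1 <;> simp [partA, aIdx, bIdx, hj, ih]

theorem twoSt_nil_right (dist : Int) (a : List Int) : twoSt dist a [] = (a, [], 0) := by
  cases a <;> simp [twoSt]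

-- A's index loop computes the suffix recursion (fuel at least the remaining measure)
theorem loopA_eq_twoSt (dist : Int) (a b : List Int) :
    ∀ (fuel top down : Nat) (ans : Int), top ≤ a.length → down ≤ b.length →
    (a.length - top) + (b.length - down) ≤ fuel →
    loopA dist a b fuel top down ans = ans + (twoSt dist (a.drop top) (b.drop down)).2.2 := by
  intro fuel
  induction fuel with
  | zero =>
    intro top down ans h1 h2 hf
    have ht : a.length ≤ top := by omega
    have hd : b.length ≤ down := by omega
    rw [List.drop_eq_nil_of_le ht, List.drop_eq_nil_of_le hd]
    simp [loopA, twoSt]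
  | succ fuel ih =>
    intro top down ans h1 h2 hf
    by_cases h : top < a.length ∧ down < b.length
    · rw [loopA, dif_pos h]
      by_cases hle : |b[down]'h.2 - a[top]'h.1| ≤ dist
      · rw [if_pos hle, ih (top + 1) (down + 1) (ans + 1) (by omega) (by omega) (by omega)]
        rw [List.drop_eq_getElem_cons h.1, List.drop_eq_getElem_cons h.2]
        simp only [twoSt, hle, if_true]
        omega
      · rw [if_neg hle]
        by_cases hgt : b[down]'h.2 > a[top]'h.1
        · rw [if_pos hgt, ih (top + 1) down ans (by omega) (by omega) (by omega)]
          conv_rhs => rw [List.drop_eq_getElem_cons h.1, List.drop_eq_getElem_cons h.2]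
          simp only [twoSt, hle, if_false, hgt, if_true]
          rw [List.drop_eq_getElem_cons h.2]
        · rw [if_neg hgt, ih top (down + 1) ans (by omega) (by omega) (by omega)]
          conv_rhs => rw [List.drop_eq_getElem_cons h.1, List.drop_eq_getElem_cons h.2]
          simp only [twoSt, hle, if_false, hgt]
          rw [List.drop_eq_getElem_cons h.1]
    · rw [loopA, dif_neg h]
      rcases Nat.lt_or_ge top a.length with hcase | hcase
      · have hdown : b.length ≤ down := by omega
        rw [List.drop_eq_nil_of_le hdown, twoSt_nil_right]
        simp
      · rw [List.drop_eq_nil_of_le hcase]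
        simp [twoSt]

-- the recursion factors through the residual state of a prefix run
theorem twoSt_split (dist : Int) : ∀ (u v A' B' : List Int),
    twoSt dist (u ++ A') (v ++ B') =
      ((twoSt dist ((twoSt dist u v).1 ++ A') ((twoSt dist u v).2.1 ++ B')).1,
       (twoSt dist ((twoSt dist u v).1 ++ A') ((twoSt dist u v).2.1 ++ B')).2.1,
       (twoSt dist u v).2.2 +
         (twoSt dist ((twoSt dist u v).1 ++ A') ((twoSt dist u v).2.1 ++ B')).2.2) := by
  intro u v A' B'
  fun_induction twoSt dist u v with
  | case1 b => simp
  | case2 a as_ => simp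
  | case3 x xs y ys hle r ih =>
    simp only [List.cons_append, twoSt, hle, if_true]
    have hr : r = twoSt dist xs ys := rfl
    rw [ih, hr]
    simp only [Prod.mk.injEq]
    exact ⟨trivial, trivial, by omega⟩
  | case4 x xs y ys hle hgt ih =>
    simp only [List.cons_append, twoSt, hle, if_false, hgt, if_true] at *
    rw [ih]
  | case5 x xs y ys hle hgt ih =>
    simp only [List.cons_append, twoSt, hle, if_false, hgt] at *
    rw [ih]

-- one new catcher index k against a queue of smaller person indices: expiry + match
theorem twoSt_one_b (dist k : Int) : ∀ (qb : List Int), (∀ x ∈ qb, x < k) →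
    twoSt dist [k] qb =
      match qb.dropWhile (fun x => x < k - dist) with
      | [] => ([k], [], 0)
      | _ :: t => ([], t, 1) := by
  intro qb
  induction qb with
  | nil => intro _; simp [twoSt]
  | cons y ys ih =>
    intro h
    have hy : y < k := h y (by simp)
    by_cases hd : y < k - dist
    · have h1 : ¬ |y - k| ≤ dist := by rw [abs_le]; omega
      have h2 : ¬ y > k := by omega
      simp only [twoSt, h1, if_false, h2, List.dropWhile]
      simp only [hd, decide_true]
      exact ih (fun x hx => h x (List.mem_cons_of_mem _ hx))
    · have h1 : |y - k| ≤ dist := by rw [abs_le]; omega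
      simp [twoSt, h1, List.dropWhile, hd]

-- one new person index k against a queue of smaller catcher indices: expiry + match
theorem twoSt_one_a (dist k : Int) : ∀ (qa : List Int), (∀ x ∈ qa, x < k) →
    twoSt dist qa [k] =
      match qa.dropWhile (fun x => x < k - dist) with
      | [] => ([], [k], 0)
      | _ :: t => (t, [], 1) := by
  intro qa
  induction qa with
  | nil => intro _; simp [twoSt]
  | cons y ys ih =>
    intro h
    have hy : y < k := h y (by simp)
    by_cases hd : y < k - dist
    · have h1 : ¬ |k - y| ≤ dist := by rw [abs_le]; omega
      have h2 : k > y := hy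
      simp only [twoSt, h1, if_false, h2, if_true, List.dropWhile]
      simp only [hd, decide_true]
      exact ih (fun x hx => h x (List.mem_cons_of_mem _ hx))
    · have h1 : |k - y| ≤ dist := by rw [abs_le]; omega
      simp [twoSt, h1, List.dropWhile, hd, twoSt_nil_right]

-- main invariant: B's sweep equals the two-pointer recursion on the not-yet-seen indices,
-- given queues of past indices of which at least one is empty
theorem bLoop_eq (dist : Int) : ∀ (rest : List Int) (k : Int) (qa qb : List Int) (ans : Int),
    (∀ x ∈ qa, x < k) → (∀ x ∈ qb, x < k) → (qa = [] ∨ qb = []) →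
    bLoop dist rest k (qa, qb, ans) =
      ans + (twoSt dist (qa ++ aIdx rest k) (qb ++ bIdx rest k)).2.2 := by
  intro rest
  induction rest with
  | nil =>
    intro k qa qb ans _ _ hinv
    rcases hinv with h | h <;> subst h <;>
      simp [bLoop, aIdx, bIdx, twoSt, twoSt_nil_right]
  | cons j rest ih =>
    intro k qa qb ans hqa hqb hinv
    by_cases hj : j == 1
    · have hA : aIdx (j :: rest) k = k :: aIdx rest (k + 1) := by simp [aIdx, hj]
      have hB : bIdx (j :: rest) k = bIdx rest (k + 1) := by simp [bIdx, hj]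
      rw [hA, hB]
      have h22 : (twoSt dist (qa ++ k :: aIdx rest (k + 1)) (qb ++ bIdx rest (k + 1))).2.2 =
          (twoSt dist (qa ++ [k]) qb).2.2 +
          (twoSt dist ((twoSt dist (qa ++ [k]) qb).1 ++ aIdx rest (k + 1))
                      ((twoSt dist (qa ++ [k]) qb).2.1 ++ bIdx rest (k + 1))).2.2 := by
        have happ : qa ++ k :: aIdx rest (k + 1) = (qa ++ [k]) ++ aIdx rest (k + 1) := by simp
        rw [happ, twoSt_split]
      cases hd : qb.dropWhile (fun x => decide (x < k - dist)) with
      | nil =>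
        have hkey : twoSt dist (qa ++ [k]) qb = (qa ++ [k], [], 0) := by
          rcases hinv with h | h
          · subst h
            have := twoSt_one_b dist k qb hqb
            rw [hd] at this
            simpa using this
          · subst h; exact twoSt_nil_right _ _
        have hstep : bLoop dist (j :: rest) k (qa, qb, ans) =
            bLoop dist rest (k + 1) (qa ++ [k], [], ans) := by
          simp only [bLoop, hj, if_true, hd]
        rw [hstep, ih (k + 1) (qa ++ [k]) [] ans
              (by intro x hx; rcases List.mem_append.mp hx with h | h
                  · exact lt_trans (hqa x h) (by omega)
                  · simp at h; omega)
              (by intro x hx; simp at hx) (Or.inr rfl)]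
        rw [h22, hkey]
        simp only []
        omega
      | cons hH t =>
        have hqa0 : qa = [] := by
          rcases hinv with h | h
          · exact h
          · subst h; simp [List.dropWhile] at hd
        subst hqa0
        have hkey : twoSt dist ([] ++ [k]) qb = ([], t, 1) := by
          have := twoSt_one_b dist k qb hqb
          rw [hd] at this
          simpa using this
        have hsubt : ∀ x ∈ t, x ∈ qb := by
          intro x hx
          have hmem : x ∈ qb.dropWhile (fun x => decide (x < k - dist)) := by
            rw [hd]; exact List.mem_cons_of_mem _ hx
          exact (List.dropWhile_sublist _).subset hmem
        have hstep : bLoop dist (j :: rest) k ([], qb, ans) =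
            bLoop dist rest (k + 1) ([], t, ans + 1) := by
          simp only [bLoop, hj, if_true, hd]
        rw [hstep, ih (k + 1) [] t (ans + 1)
              (by intro x hx; simp at hx)
              (by intro x hx; exact lt_trans (hqb x (hsubt x hx)) (by omega))
              (Or.inl rfl)]
        rw [h22, hkey]
        simp only []
        omega
    · have hA : aIdx (j :: rest) k = aIdx rest (k + 1) := by simp [aIdx, hj]
      have hB : bIdx (j :: rest) k = k :: bIdx rest (k + 1) := by simp [bIdx, hj]
      rw [hA, hB]
      have h22 : (twoSt dist (qa ++ aIdx rest (k + 1)) (qb ++ k :: bIdx rest (k + 1))).2.2 =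
          (twoSt dist qa (qb ++ [k])).2.2 +
          (twoSt dist ((twoSt dist qa (qb ++ [k])).1 ++ aIdx rest (k + 1))
                      ((twoSt dist qa (qb ++ [k])).2.1 ++ bIdx rest (k + 1))).2.2 := by
        have happ : qb ++ k :: bIdx rest (k + 1) = (qb ++ [k]) ++ bIdx rest (k + 1) := by simp
        rw [happ, twoSt_split]
      cases hd : qa.dropWhile (fun x => decide (x < k - dist)) with
      | nil =>
        have hkey : twoSt dist qa (qb ++ [k]) = ([], qb ++ [k], 0) := by
          rcases hinv with h | h
          · subst h; simp [twoSt]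
          · subst h
            have := twoSt_one_a dist k qa hqa
            rw [hd] at this
            simpa using this
        have hstep : bLoop dist (j :: rest) k (qa, qb, ans) =
            bLoop dist rest (k + 1) ([], qb ++ [k], ans) := by
          simp [bLoop, hj, hd]
        rw [hstep, ih (k + 1) [] (qb ++ [k]) ans
              (by intro x hx; simp at hx)
              (by intro x hx; rcases List.mem_append.mp hx with h | h
                  · exact lt_trans (hqb x h) (by omega)
                  · simp at h; omega)
              (Or.inl rfl)]
        rw [h22, hkey]
        simp only []
        omega
      | cons hH t =>
        have hqb0 : qb = [] := by
          rcases hinv with h | h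
          · subst h; simp [List.dropWhile] at hd
          · exact h
        subst hqb0
        have hkey : twoSt dist qa ([] ++ [k]) = (t, [], 1) := by
          have := twoSt_one_a dist k qa hqa
          rw [hd] at this
          simpa using this
        have hsubt : ∀ x ∈ t, x ∈ qa := by
          intro x hx
          have hmem : x ∈ qa.dropWhile (fun x => decide (x < k - dist)) := by
            rw [hd]; exact List.mem_cons_of_mem _ hx
          exact (List.dropWhile_sublist _).subset hmem
        have hstep : bLoop dist (j :: rest) k (qa, [], ans) =
            bLoop dist rest (k + 1) (t, [], ans + 1) := by
          simp [bLoop, hj, hd]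
        rw [hstep, ih (k + 1) t [] (ans + 1)
              (by intro x hx; exact lt_trans (hqa x (hsubt x hx)) (by omega))
              (by intro x hx; simp at hx)
              (Or.inr rfl)]
        rw [h22, hkey]
        simp only []
        omega

-- ===== VERDICT (by name: the statement is the Claim_ definition above) =====
theorem catchMaximumAmountofPeople_spec : Claim_equal_catchMaximumAmountofPeople := by
  intro team dist _
  unfold Spec_catchMaximumAmountofPeople catchMaximumAmountofPeople catchMaximumAmountofPeople_alt
  rw [partA_eq, bLoop_eq dist team 0 [] [] 0 (by simp) (by simp) (Or.inl rfl)]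
  simp only []
  rw [loopA_eq_twoSt dist _ _ _ 0 0 0 (by omega) (by omega) (by omega)]
  simp
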